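-- pv_equiv track=rewrite | github.com/Man1907/Lubricant-Classification-Project | assign_casual_photos.py | find_nearest_reference
-- ===== SOURCE A (Python) =====
-- def find_nearest_reference(photo_num, ref_numbers):
--     """
--     Find the nearest reference photo by number.
--     Prefer the reference photo just BEFORE this one (same heating stage).
--     """
--     best_ref = None
--     best_dist = float("inf")
--
--     for ref_num in ref_numbers:
--         # Prefer earlier reference (casual photo was taken at same stage)
--         dist = photo_num - ref_num
--         if dist >= 0 and dist < best_dist:
--             best_dist = dist
--             best_ref = ref_num
--
--     # If no earlier reference found, use the closest one
--     if best_ref is None: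
--         for ref_num in ref_numbers:
--             dist = abs(photo_num - ref_num)
--             if dist < best_dist:
--                 best_dist = dist
--                 best_ref = ref_num
--
--     return best_ref
-- ===== SOURCE B (Python) =====
-- def find_nearest_reference(photo_num, ref_numbers):
--     """Single merged pass: keep the best 'before' ref and the best 'any' ref
--     in two independent accumulators; return the 'before' one if it exists."""
--     best_before = None
--     dist_before = float("inf")
--     best_any = None
--     dist_any = float("inf")
--     for ref_num in ref_numbers:
--         d = photo_num - ref_num
--         if d >= 0 and d < dist_before:
--             dist_before = d
--             best_before = ref_num
--         if abs(d) < dist_any: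
--             dist_any = abs(d)
--             best_any = ref_num
--     return best_before if best_before is not None else best_any
-- ===== Notes on version B (the rewrite author's own statement) =====
-- stated objective: alternative
-- what changed: A's conditional second full scan (run only when no earlier reference exists) is merged into a single pass that maintains two independent accumulators (best earlier ref and best absolute-distance ref) and picks between them after the loop.
import Mathlib
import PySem

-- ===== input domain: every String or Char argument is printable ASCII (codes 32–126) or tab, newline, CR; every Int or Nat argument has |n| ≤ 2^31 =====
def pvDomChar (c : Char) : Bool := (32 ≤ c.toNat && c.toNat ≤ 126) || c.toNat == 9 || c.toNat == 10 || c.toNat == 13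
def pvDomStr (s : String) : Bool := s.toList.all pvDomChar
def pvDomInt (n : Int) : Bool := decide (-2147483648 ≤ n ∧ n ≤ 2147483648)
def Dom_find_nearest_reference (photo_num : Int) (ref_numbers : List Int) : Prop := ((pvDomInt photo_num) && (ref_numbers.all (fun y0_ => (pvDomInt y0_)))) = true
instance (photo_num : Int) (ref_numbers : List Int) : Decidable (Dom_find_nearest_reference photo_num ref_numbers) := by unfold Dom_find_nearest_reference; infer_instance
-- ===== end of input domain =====

-- B merges A's conditional second scan into one pass with two independent accumulators (alternative decomposition, same cost); return values only.


-- dist < best_dist where best_dist starts as float("inf"): none models inf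
def pvLtInf (d : Int) : Option Int → Bool
  | none => true
  | some b => decide (d < b)

-- ===== PORT A =====
-- first loop of A: prefer refs at or before photo_num
def pvALoop1 (photo_num : Int) (ref_numbers : List Int) : Option Int × Option Int :=
  ref_numbers.foldl (fun st ref_num =>
    let dist := photo_num - ref_num
    if 0 ≤ dist && pvLtInf dist st.2 then (some ref_num, some dist) else st)
    (none, none)

-- second loop of A: closest by absolute distance, continuing with the same state
def pvALoop2 (photo_num : Int) (ref_numbers : List Int) (st0 : Option Int × Option Int) : Option Int × Option Int :=
  ref_numbers.foldl (fun st ref_num =>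
    let dist := |photo_num - ref_num|
    if pvLtInf dist st.2 then (some ref_num, some dist) else st) st0

def find_nearest_reference (photo_num : Int) (ref_numbers : List Int) : Option Int :=
  let s := pvALoop1 photo_num ref_numbers
  match s.1 with
  | some r => some r
  | none => (pvALoop2 photo_num ref_numbers s).1

-- ===== PORT B =====
-- single pass; state = ((best_before, dist_before), (best_any, dist_any))
def find_nearest_reference_alt (photo_num : Int) (ref_numbers : List Int) : Option Int :=
  let s := ref_numbers.foldl
    (fun (st : (Option Int × Option Int) × (Option Int × Option Int)) ref_num =>
      let d := photo_num - ref_num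
      let before := if 0 ≤ d && pvLtInf d st.1.2 then (some ref_num, some d) else st.1
      let any := if pvLtInf |d| st.2.2 then (some ref_num, some |d|) else st.2
      (before, any))
    ((none, none), (none, none))
  match s.1.1 with
  | some r => some r
  | none => s.2.1

-- ===== PRECONDITION & SPEC =====
def Spec_find_nearest_reference (photo_num : Int) (ref_numbers : List Int) (out : Option Int) : Prop := out = find_nearest_reference_alt photo_num ref_numbers
instance (photo_num : Int) (ref_numbers : List Int) (out : Option Int) : Decidable (Spec_find_nearest_reference photo_num ref_numbers out) := by unfold Spec_find_nearest_reference; infer_instance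

-- ===== CLAIM (what is proved, stated in full; the proofs are below) =====
def Claim_equal_find_nearest_reference : Prop := ∀ (photo_num : Int) (ref_numbers : List Int), Dom_find_nearest_reference photo_num ref_numbers → Spec_find_nearest_reference photo_num ref_numbers (find_nearest_reference photo_num ref_numbers)

-- ===== LEMMAS AND PROOFS =====

-- B's paired fold splits into the two independent folds
theorem pvB_split (photo_num : Int) (ref_numbers : List Int)
    (s1 s2 : Option Int × Option Int) :
    ref_numbers.foldl
      (fun (st : (Option Int × Option Int) × (Option Int × Option Int)) ref_num =>
        let d := photo_num - ref_num
        let before := if 0 ≤ d && pvLtInf d st.1.2 then (some ref_num, some d) else st.1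
        let any := if pvLtInf |d| st.2.2 then (some ref_num, some |d|) else st.2
        (before, any))
      (s1, s2)
    = (ref_numbers.foldl (fun st ref_num =>
        let dist := photo_num - ref_num
        if 0 ≤ dist && pvLtInf dist st.2 then (some ref_num, some dist) else st) s1,
       ref_numbers.foldl (fun st ref_num =>
        let dist := |photo_num - ref_num|
        if pvLtInf dist st.2 then (some ref_num, some dist) else st) s2) := by
  induction ref_numbers generalizing s1 s2 with
  | nil => rfl
  | cons x xs ih => simp only [List.foldl_cons]; exact ih _ _

-- in A's first loop, best_ref and best_dist become some together
theorem pvALoop1_none (photo_num : Int) (ref_numbers : List Int)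
    (st : Option Int × Option Int) (h : st.1 = none → st.2 = none) :
    (ref_numbers.foldl (fun st ref_num =>
        let dist := photo_num - ref_num
        if 0 ≤ dist && pvLtInf dist st.2 then (some ref_num, some dist) else st) st).1 = none →
    (ref_numbers.foldl (fun st ref_num =>
        let dist := photo_num - ref_num
        if 0 ≤ dist && pvLtInf dist st.2 then (some ref_num, some dist) else st) st).2 = none := by
  induction ref_numbers generalizing st with
  | nil => exact h
  | cons x xs ih =>
      simp only [List.foldl_cons]
      apply ih
      intro hn
      dsimp only at hn ⊢
      by_cases hc : (decide (0 ≤ photo_num - x) && pvLtInf (photo_num - x) st.2) = true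
      · rw [if_pos hc] at hn; cases hn
      · rw [if_neg hc] at hn ⊢; exact h hn

-- ===== VERDICT (by name: the statement is the Claim_ definition above) =====
theorem find_nearest_reference_spec : Claim_equal_find_nearest_reference := by
  intro photo_num refs _
  unfold Spec_find_nearest_reference find_nearest_reference find_nearest_reference_alt pvALoop1 pvALoop2
  rw [pvB_split]
  set f1 := refs.foldl (fun st ref_num =>
      let dist := photo_num - ref_num
      if 0 ≤ dist && pvLtInf dist st.2 then (some ref_num, some dist) else st) ((none, none) : Option Int × Option Int) with hf1
  cases h1 : f1.1 with
  | some r => simp [h1]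
  | none =>
      have h2 : f1.2 = none := by
        apply pvALoop1_none photo_num refs (none, none) (by intro; rfl)
        exact h1
      have hf : f1 = (none, none) := Prod.ext h1 h2
      rw [hf]
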